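-- pv_equiv track=rewrite | github.com/Y3drk/ASD_2021 | cw_sortowania/cw2_zad4_kubly_wody_crd_NikoKorohoda.py | lanie_wody
-- ===== SOURCE A (Python) =====
-- poczatek = 0
--
-- koniec = 1
--
-- def lanie_wody(buckets,limit):
--     counter, last_height, curr_width, i = 0, 0, 0, 0
--     while i < len(buckets):
--         limit -= (buckets[i][0] - last_height) * curr_width
--         if limit >= 0: #warunek konca
--             if buckets[i][2] == koniec:
--                 counter += 1
--         else:
--             break
--
--         if buckets[i][2] == poczatek:
--             curr_width += buckets[i][1]
--         else:
--             curr_width -= buckets[i][1]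
--
--         last_height = buckets[i][0]
--         i += 1
--
--     return counter
-- ===== SOURCE B (Python) =====
-- def lanie_wody(buckets, limit):
--     n = len(buckets)
--     # widths[i] = width in effect just before event i (prefix sum of signed widths)
--     widths = [0] * (n + 1)
--     for i, (h, w, t) in enumerate(buckets):
--         widths[i + 1] = widths[i] + (w if t == 0 else -w)
--     # first index where total consumed water exceeds the limit (or n if never)
--     consumed = 0
--     last = 0
--     stop = n
--     for i, (h, w, t) in enumerate(buckets):
--         consumed += (h - last) * widths[i]
--         if consumed > limit:
--             stop = i
--             break
--         last = h
--     # count 'koniec' events strictly before the crossing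
--     return sum(1 for (h, w, t) in buckets[:stop] if t == 1)
-- ===== Notes on version B (the rewrite author's own statement) =====
-- stated objective: alternative
-- what changed: A counts 'koniec' events inline in one stateful sweep; B decomposes into a prefix-sum of signed widths, a first-crossing search for where consumed water exceeds the limit, and a separate count of 'koniec' events over the prefix before that index.
import Mathlib
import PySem

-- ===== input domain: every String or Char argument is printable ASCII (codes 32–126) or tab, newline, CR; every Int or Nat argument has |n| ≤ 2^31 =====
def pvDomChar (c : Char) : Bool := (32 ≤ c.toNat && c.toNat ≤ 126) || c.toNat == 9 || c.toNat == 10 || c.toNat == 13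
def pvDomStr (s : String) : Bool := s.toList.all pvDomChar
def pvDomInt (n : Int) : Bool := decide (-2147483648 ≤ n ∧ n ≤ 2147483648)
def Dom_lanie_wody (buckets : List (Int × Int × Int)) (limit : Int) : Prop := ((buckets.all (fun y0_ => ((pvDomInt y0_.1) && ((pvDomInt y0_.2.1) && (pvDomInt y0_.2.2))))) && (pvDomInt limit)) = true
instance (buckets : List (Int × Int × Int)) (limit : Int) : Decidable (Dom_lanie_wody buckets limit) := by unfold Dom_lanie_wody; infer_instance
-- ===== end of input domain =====

-- B replaces A's single stateful sweep by a prefix-sum of widths, a first-crossing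
-- search, and a separate count over the prefix (objective: alternative decomposition).

-- ===== PORT A =====
-- A's while loop over i with state (counter, last_height, curr_width, limit),
-- transliterated as structural recursion consuming the list.
def laAux : List (Int × Int × Int) → Int → Int → Int → Int → Int
  | [], counter, _, _, _ => counter
  | (h, w, t) :: rest, counter, last, width, limit =>
    let limit' := limit - (h - last) * width
    if 0 ≤ limit' then
      let counter' := if t == 1 then counter + 1 else counter
      let width' := if t == 0 then width + w else width - w
      laAux rest counter' h width' limit'
    else
      counter

def lanie_wody (buckets : List (Int × Int × Int)) (limit : Int) : Int :=
  laAux buckets 0 0 0 limit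

-- ===== PORT B =====
-- widths in effect just before each event (prefix sum of signed widths)
def laAltScan : List (Int × Int × Int) → Int → List Int
  | [], _ => []
  | (_, w, t) :: rest, acc => acc :: laAltScan rest (acc + (if t == 0 then w else -w))

-- first index where consumed water exceeds the limit (length if never)
def laAltStop : List ((Int × Int × Int) × Int) → Int → Int → Int → Nat
  | [], _, _, _ => 0
  | ((h, _, _), wi) :: rest, consumed, last, limit =>
    let c' := consumed + (h - last) * wi
    if limit < c' then 0 else 1 + laAltStop rest c' h limit

def lanie_wody_alt (buckets : List (Int × Int × Int)) (limit : Int) : Int :=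
  ((buckets.take (laAltStop (buckets.zip (laAltScan buckets 0)) 0 0 limit)).filter
      (fun e => e.2.2 == 1)).length

-- ===== PRECONDITION & SPEC =====
def Spec_lanie_wody (buckets : List (Int × Int × Int)) (limit : Int) (out : Int) : Prop := out = lanie_wody_alt buckets limit
instance (buckets : List (Int × Int × Int)) (limit : Int) (out : Int) : Decidable (Spec_lanie_wody buckets limit out) := by unfold Spec_lanie_wody; infer_instance

-- ===== CLAIM (what is proved, stated in full; the proofs are below) =====
def Claim_equal_lanie_wody : Prop := ∀ (buckets : List (Int × Int × Int)) (limit : Int), Dom_lanie_wody buckets limit → Spec_lanie_wody buckets limit (lanie_wody buckets limit)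

-- ===== LEMMAS AND PROOFS =====
theorem laAux_eq (l : List (Int × Int × Int)) :
    ∀ (counter last width consumed limit : Int),
      laAux l counter last width (limit - consumed) =
        counter + ((l.take (laAltStop (l.zip (laAltScan l width)) consumed last limit)).filter
            (fun e => e.2.2 == 1)).length := by
  induction l with
  | nil => intro counter last width consumed limit; simp [laAux, laAltStop]
  | cons e rest ih =>
    intro counter last width consumed limit
    obtain ⟨h, w, t⟩ := e
    have hw : width + (if t == 0 then w else -w) = (if t == 0 then width + w else width - w) := by
      by_cases ht : t == 0 <;> simp [ht] <;> ring
    simp only [laAux, laAltScan, List.zip_cons_cons, laAltStop, hw]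
    by_cases hc : limit < consumed + (h - last) * width
    · rw [if_pos hc, if_neg (show ¬ (0 ≤ limit - consumed - (h - last) * width) by omega)]
      simp
    · rw [if_neg hc, if_pos (show (0:Int) ≤ limit - consumed - (h - last) * width by omega)]
      have harg : limit - consumed - (h - last) * width
          = limit - (consumed + (h - last) * width) := by ring
      rw [harg, ih _ h _ (consumed + (h - last) * width) limit]
      rw [Nat.add_comm 1, List.take_succ_cons, List.filter_cons]
      by_cases ht : t == 1 <;> simp [ht] <;> push_cast <;> ring

-- ===== VERDICT (by name: the statement is the Claim_ definition above) =====
theorem lanie_wody_spec : Claim_equal_lanie_wody := by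
  intro buckets limit _
  unfold Spec_lanie_wody lanie_wody lanie_wody_alt
  have := laAux_eq buckets 0 0 0 0 limit
  simpa using this
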